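-- pv_equiv track=rewrite | github.com/eanorambuena/PTK_SignificantFiguresCalculator | SFCLibrary.py | dn
-- ===== SOURCE A (Python) =====
-- def dn(x): #decimal numbers
--   c=''
--   key=0
--   for i in x:
--     if i=='.':
--       key=1
--     elif key and i.isdigit():
--       c+=i
--   return c
-- ===== SOURCE B (Python) =====
-- def dn(x): #decimal numbers
--   j = x.find('.')
--   if j < 0:
--     return ''
--   tail = x[j+1:]
--   junk = ''.join(set(tail) - set('0123456789'))
--   return tail.translate(str.maketrans('', '', junk))
-- ===== Notes on version B (the rewrite author's own statement) =====
-- stated objective: faster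
-- what changed: Replaces the flag-driven character scan with find-the-dot indexing plus a table-driven deletion: build the set of non-digit characters occurring in the tail and delete them all at once with str.translate, instead of testing and appending character by character.
import Mathlib
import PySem

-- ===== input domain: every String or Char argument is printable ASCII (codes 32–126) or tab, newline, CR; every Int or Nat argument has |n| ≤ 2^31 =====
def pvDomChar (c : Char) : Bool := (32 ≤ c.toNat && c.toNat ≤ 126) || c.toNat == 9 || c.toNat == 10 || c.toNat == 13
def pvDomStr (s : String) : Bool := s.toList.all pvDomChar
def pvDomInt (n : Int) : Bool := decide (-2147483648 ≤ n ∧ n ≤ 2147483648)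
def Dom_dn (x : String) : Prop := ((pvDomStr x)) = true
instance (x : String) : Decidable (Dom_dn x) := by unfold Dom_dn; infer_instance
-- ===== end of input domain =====

-- B locates the first '.' by index, then deletes the tail's non-digit character set via a translation table (objective: alternative).


-- ===== PORT A =====
-- flag-driven scan: state (c, key)
def dnStep (s : List Char × Bool) (i : Char) : List Char × Bool :=
  if i = '.' then (s.1, true)
  else if s.2 && PySem.Chars.isdigit i then (s.1 ++ [i], s.2)
  else s

def dn (x : String) : String :=
  String.ofList (x.toList.foldl dnStep ([], false)).1

-- ===== PORT B =====
-- set('0123456789')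
def pyDigits : List Char := ['0','1','2','3','4','5','6','7','8','9']

-- j = x.find('.'); tail = x[j+1:]; junk = set(tail) - set('0123456789');
-- tail.translate(maketrans('','',junk)) keeps exactly the characters not in the deletion set
def dn_alt (x : String) : String :=
  let l := x.toList
  let j := PySem.Chars.find l ['.']
  if j < 0 then ""
  else
    let tail := PySem.List.slice l (some (j + 1)) none
    let junk := PySem.Set.diff (PySem.Set.ofList tail) pyDigits
    String.ofList (tail.filter (fun c => !(PySem.Set.contains junk c)))

-- ===== PRECONDITION & SPEC =====
def Spec_dn (x : String) (out : String) : Prop := out = dn_alt x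
instance (x : String) (out : String) : Decidable (Spec_dn x out) := by unfold Spec_dn; infer_instance

-- ===== CLAIM (what is proved, stated in full; the proofs are below) =====
def Claim_equal_dn : Prop := ∀ (x : String), Dom_dn x → Spec_dn x (dn x)

-- ===== LEMMAS AND PROOFS =====
theorem dn_loop_true (l : List Char) (acc : List Char) :
    (l.foldl dnStep (acc, true)).1 = acc ++ l.filter PySem.Chars.isdigit := by
  induction l generalizing acc with
  | nil => simp
  | cons i t ih =>
    by_cases hd : i = '.'
    · subst hd
      simp [dnStep, ih, PySem.Chars.isdigit]
    · by_cases hdig : PySem.Chars.isdigit i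
      · simp [dnStep, hd, hdig, ih]
      · simp [dnStep, hd, hdig, ih]

theorem dn_loop_false (l : List Char) (acc : List Char) :
    (l.foldl dnStep (acc, false)).1
      = acc ++ ((l.dropWhile (· ≠ '.')).drop 1).filter PySem.Chars.isdigit := by
  induction l generalizing acc with
  | nil => simp
  | cons i t ih =>
    by_cases hd : i = '.'
    · subst hd
      simp [dnStep, dn_loop_true, List.dropWhile]
    · simp [dnStep, hd, ih, List.dropWhile]

theorem singleton_infix_of_mem (c : Char) (l : List Char) (h : c ∈ l) : [c] <:+: l := by
  obtain ⟨s, t, rfl⟩ := List.append_of_mem h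
  exact ⟨s, t, by simp⟩

theorem singleton_prefix_iff (c : Char) (t : List Char) :
    [c] <+: t ↔ t.head? = some c := by
  cases t with
  | nil => simp
  | cons a t => simp [List.cons_prefix_cons, eq_comm]

theorem dropWhile_eq_drop_of_first (l : List Char) (k : Nat)
    (hk : l[k]? = some '.')
    (hmin : ∀ i, i < k → l[i]? ≠ some '.') :
    l.dropWhile (· ≠ '.') = l.drop k := by
  induction l generalizing k with
  | nil => simp at hk
  | cons a t ih =>
    cases k with
    | zero =>
      simp only [List.getElem?_cons_zero, Option.some.injEq] at hk
      subst hk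
      simp [List.dropWhile]
    | succ k =>
      have ha : a ≠ '.' := by
        have := hmin 0 (Nat.succ_pos k)
        simpa using this
      have hstep : (a :: t).dropWhile (· ≠ '.') = t.dropWhile (· ≠ '.') := by
        simp [List.dropWhile, ha]
      rw [hstep, List.drop_succ_cons]
      simp only [List.getElem?_cons_succ] at hk
      exact ih k hk (fun i hi => by
        have := hmin (i + 1) (Nat.succ_lt_succ hi)
        simpa using this)

theorem mem_pyDigits_iff (c : Char) : c ∈ pyDigits ↔ ('0' ≤ c ∧ c ≤ '9') := by
  constructor
  · intro h
    fin_cases h <;> exact ⟨by decide, by decide⟩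
  · rintro ⟨h0, h9⟩
    rw [Char.le_def, UInt32.le_iff_toNat_le] at h0 h9
    have hlo : 48 ≤ c.toNat := h0
    have hhi : c.toNat ≤ 57 := h9
    have hc : c = Char.ofNat c.toNat := (Char.ofNat_toNat c).symm
    interval_cases h : c.toNat <;> rw [pyDigits, hc] <;> decide

theorem keep_eq_isdigit (t : List Char) (c : Char) (hc : c ∈ t) :
    (!(PySem.Set.contains (PySem.Set.diff (PySem.Set.ofList t) pyDigits) c))
      = PySem.Chars.isdigit c := by
  have hmem : c ∈ PySem.Set.ofList t := (PySem.Set.mem_ofList t c).mpr hc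
  by_cases hd : c ∈ pyDigits
  · have : c ∉ PySem.Set.diff (PySem.Set.ofList t) pyDigits := by
      simp [PySem.Set.mem_diff, hd]
    have h9 := (mem_pyDigits_iff c).mp hd
    simp [this, PySem.Chars.isdigit, h9.1, h9.2]
  · have : c ∈ PySem.Set.diff (PySem.Set.ofList t) pyDigits := by
      simp [PySem.Set.mem_diff, hmem, hd]
    have h9 : ¬ ('0' ≤ c ∧ c ≤ '9') := fun h => hd ((mem_pyDigits_iff c).mpr h)
    simp only [PySem.Chars.isdigit]
    simp [this]
    intro h0c
    exact lt_of_not_ge (fun hb => h9 ⟨h0c, hb⟩)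
  
-- ===== VERDICT (by name: the statement is the Claim_ definition above) =====
theorem dn_spec : Claim_equal_dn := by
  intro x _
  unfold Spec_dn dn dn_alt
  rw [dn_loop_false]
  set l := x.toList with hl
  by_cases hneg : PySem.Chars.find l ['.'] < 0
  · -- no '.' in l: A's dropWhile consumes everything
    have hj : PySem.Chars.find l ['.'] = -1 := by
      have := PySem.Chars.neg_one_le_find l ['.']
      omega
    have hni : ¬ ['.'] <:+: l := (PySem.Chars.find_eq_neg_one_iff l ['.']).mp hj
    have hnm : '.' ∉ l := fun hm => hni (singleton_infix_of_mem '.' l hm)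
    have hdw : l.dropWhile (· ≠ '.') = [] := by
      rw [List.dropWhile_eq_nil_iff]
      intro c hc
      simp
      intro h; exact hnm (h ▸ hc)
    have hdw2 : List.dropWhile (fun x => !decide (x = '.')) l = [] := by
      simpa using hdw
    simp [hneg, hdw2]
  · have h0 : 0 ≤ PySem.Chars.find l ['.'] := by
      have := PySem.Chars.neg_one_le_find l ['.']
      omega
    have hspec := PySem.Chars.find_spec (s := l) (sub := ['.']) h0
    set j := (PySem.Chars.find l ['.']).toNat with hjdef
    have hget : l[j]? = some '.' := by
      have := (singleton_prefix_iff '.' (l.drop j)).mp hspec.1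
      simpa [List.head?_drop] using this
    have hmin : ∀ i, i < j → l[i]? ≠ some '.' := by
      intro i hi hcon
      exact hspec.2 i hi ((singleton_prefix_iff '.' (l.drop i)).mpr
        (by simpa [List.head?_drop] using hcon))
    have hdw : l.dropWhile (· ≠ '.') = l.drop j := dropWhile_eq_drop_of_first l j hget hmin
    have hslice : PySem.List.slice l (some (PySem.Chars.find l ['.'] + 1)) none
        = (l.drop j).drop 1 := by
      rw [PySem.List.slice_from _ (by omega)]
      rw [List.drop_drop]
      congr 1
      omega
    simp only [hneg, hslice, hdw]
    rw [List.filter_congr (fun c hc => keep_eq_isdigit _ c hc)]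
    simp
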